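-- pv_equiv track=rewrite | github.com/JackDanger/rigz | scripts/compare_asm.py | extract_literal_pattern
-- ===== SOURCE A (Python) =====
-- from typing import List, Dict, Tuple, Set
--
-- def extract_literal_pattern(asm_lines: List[str]) -> List[str]:
--     """Extract the literal decode pattern from assembly"""
--     literal = []
--     in_literal = False
--
--     for line in asm_lines:
--         # Look for literal check pattern (tbnz/tbz with bit 31)
--         if ('tbnz' in line.lower() or 'tbz' in line.lower()) and '#31' in line:
--             in_literal = True
--
--         if in_literal:
--             literal.append(line)
--             if 'strb' in line.lower():  # End at store byte
--                 in_literal = False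
--                 break
--
--     return literal
-- ===== SOURCE B (Python) =====
-- def extract_literal_pattern(asm_lines):
--     """Extract the literal decode pattern from assembly"""
--     def is_start(line):
--         low = line.lower()
--         return ('tbnz' in low or 'tbz' in low) and '#31' in line
--
--     start = None
--     for i, line in enumerate(asm_lines):
--         if is_start(line):
--             start = i
--             break
--     if start is None:
--         return []
--     tail = asm_lines[start:]
--     for j, line in enumerate(tail):
--         if 'strb' in line.lower():
--             return tail[:j + 1]
--     return tail
-- ===== Notes on version B (the rewrite author's own statement) =====
-- stated objective: simpler
-- what changed: Replaces the single stateful flag-driven loop with explicit boundary computation: find the first marker index, then find the first 'strb' line in the tail and return the slice up to and including it.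
import Mathlib
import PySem

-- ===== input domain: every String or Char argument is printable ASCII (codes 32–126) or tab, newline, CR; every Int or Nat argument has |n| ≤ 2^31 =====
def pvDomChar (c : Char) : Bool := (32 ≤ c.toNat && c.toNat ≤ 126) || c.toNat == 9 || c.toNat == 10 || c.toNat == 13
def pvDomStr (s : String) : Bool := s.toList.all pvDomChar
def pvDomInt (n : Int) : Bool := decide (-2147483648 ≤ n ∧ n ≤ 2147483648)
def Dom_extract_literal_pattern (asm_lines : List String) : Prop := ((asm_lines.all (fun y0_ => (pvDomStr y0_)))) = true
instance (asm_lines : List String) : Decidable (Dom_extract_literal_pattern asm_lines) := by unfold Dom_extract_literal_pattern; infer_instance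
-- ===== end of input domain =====

-- ===== PORT A =====
-- B changes decomposition only (boundary indices + slicing instead of a stateful flag loop); not faster.
def pvIsStartA (line : String) : Bool :=
  (PySem.Str.isIn "tbnz" (PySem.Str.lower line) || PySem.Str.isIn "tbz" (PySem.Str.lower line))
    && PySem.Str.isIn "#31" line

def pvIsStrbA (line : String) : Bool := PySem.Str.isIn "strb" (PySem.Str.lower line)

-- the for-loop of A: state = (literal acc, in_literal flag); `break` returns immediately
def pvLoopA : List String → Bool → List String → List String
  | [], _, acc => acc
  | l :: ls, inLit, acc =>
    let inLit := if pvIsStartA l then true else inLit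
    if inLit then
      let acc := acc ++ [l]
      if pvIsStrbA l then acc else pvLoopA ls inLit acc
    else pvLoopA ls inLit acc

def extract_literal_pattern (asm_lines : List String) : List String :=
  pvLoopA asm_lines false []

-- ===== PORT B =====
def pvIsStartB (line : String) : Bool :=
  (PySem.Str.isIn "tbnz" (PySem.Str.lower line) || PySem.Str.isIn "tbz" (PySem.Str.lower line))
    && PySem.Str.isIn "#31" line

-- first loop of Source B: index of the first marker line
def pvFindStart : List String → Nat → Option Nat
  | [], _ => none
  | l :: ls, i => if pvIsStartB l then some i else pvFindStart ls (i + 1)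

-- second loop of Source B: index of the first 'strb' line in the tail
def pvFindStrb : List String → Nat → Option Nat
  | [], _ => none
  | l :: ls, j => if PySem.Str.isIn "strb" (PySem.Str.lower l) then some j else pvFindStrb ls (j + 1)

def extract_literal_pattern_alt (asm_lines : List String) : List String :=
  match pvFindStart asm_lines 0 with
  | none => []
  | some start =>
    -- asm_lines[start:] with 0 ≤ start ≤ len: exactly List.drop
    let tail := asm_lines.drop start
    match pvFindStrb tail 0 with
    | none => tail
    | some j => tail.take (j + 1)   -- tail[:j+1], 0 ≤ j+1

-- ===== PRECONDITION & SPEC =====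
def Spec_extract_literal_pattern (asm_lines : List String) (out : List String) : Prop := out = extract_literal_pattern_alt asm_lines
instance (asm_lines : List String) (out : List String) : Decidable (Spec_extract_literal_pattern asm_lines out) := by unfold Spec_extract_literal_pattern; infer_instance

-- ===== CLAIM (what is proved, stated in full; the proofs are below) =====
def Claim_equal_extract_literal_pattern : Prop := ∀ (asm_lines : List String), Dom_extract_literal_pattern asm_lines → Spec_extract_literal_pattern asm_lines (extract_literal_pattern asm_lines)

-- ===== LEMMAS AND PROOFS =====

-- once in_literal is true, A appends each line until (and including) the first 'strb' line
def pvCollect : List String → List String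
  | [] => []
  | l :: ls => l :: (if pvIsStrbA l then [] else pvCollect ls)

theorem pvLoopA_true (ls : List String) : ∀ acc, pvLoopA ls true acc = acc ++ pvCollect ls := by
  induction ls with
  | nil => intro acc; rw [pvLoopA, pvCollect, List.append_nil]
  | cons l ls ih =>
    intro acc
    rw [show pvLoopA (l :: ls) true acc =
        (if pvIsStrbA l = true then acc ++ [l] else pvLoopA ls true (acc ++ [l])) by
      rw [pvLoopA]; rw [ite_self, if_pos rfl]]
    rw [pvCollect]
    by_cases h : pvIsStrbA l = true
    · rw [if_pos h, if_pos h]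
    · rw [if_neg h, if_neg h, ih, List.append_assoc]; rfl

theorem pvFindStrb_shift (ls : List String) :
    ∀ n, pvFindStrb ls n = (pvFindStrb ls 0).map (· + n) := by
  induction ls with
  | nil => intro n; rfl
  | cons l ls ih =>
    intro n
    by_cases h : PySem.Str.isIn "strb" (PySem.Str.lower l) = true
    · rw [pvFindStrb, if_pos h, pvFindStrb, if_pos h, Option.map_some, Nat.zero_add]
    · rw [pvFindStrb, if_neg h, ih (n + 1), pvFindStrb, if_neg h, ih 1, Option.map_map]
      rcases pvFindStrb ls 0 with _ | j
      · rfl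
      · show some (j + (n + 1)) = some (j + 1 + n)
        exact congrArg some (by omega)

theorem pvFindStart_shift (ls : List String) :
    ∀ n, pvFindStart ls n = (pvFindStart ls 0).map (· + n) := by
  induction ls with
  | nil => intro n; rfl
  | cons l ls ih =>
    intro n
    by_cases h : pvIsStartB l = true
    · rw [pvFindStart, if_pos h, pvFindStart, if_pos h, Option.map_some, Nat.zero_add]
    · rw [pvFindStart, if_neg h, ih (n + 1), pvFindStart, if_neg h, ih 1, Option.map_map]
      rcases pvFindStart ls 0 with _ | i
      · rfl
      · show some (i + (n + 1)) = some (i + 1 + n)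
        exact congrArg some (by omega)

-- B's tail phase (search for the first 'strb' line, then slice) computes pvCollect
theorem pvTail_eq_collect (t : List String) :
    (match pvFindStrb t 0 with
     | none => t
     | some j => t.take (j + 1)) = pvCollect t := by
  induction t with
  | nil => rfl
  | cons l ls ih =>
    by_cases h : PySem.Str.isIn "strb" (PySem.Str.lower l) = true
    · rw [show pvFindStrb (l :: ls) 0 = some 0 by rw [pvFindStrb, if_pos h]]
      show (l :: ls).take (0 + 1) = pvCollect (l :: ls)
      rw [pvCollect, if_pos (show pvIsStrbA l = true from h)]
      rfl
    · rcases hf : pvFindStrb ls 0 with _ | j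
      · rw [show pvFindStrb (l :: ls) 0 = none by
          rw [pvFindStrb, if_neg h, pvFindStrb_shift ls 1, hf]; rfl]
        show l :: ls = pvCollect (l :: ls)
        rw [pvCollect, if_neg (show ¬ pvIsStrbA l = true from h)]
        have ihs : ls = pvCollect ls := by rw [hf] at ih; exact ih
        rw [← ihs]
      · rw [show pvFindStrb (l :: ls) 0 = some (j + 1) by
          rw [pvFindStrb, if_neg h, pvFindStrb_shift ls 1, hf]; rfl]
        show (l :: ls).take (j + 1 + 1) = pvCollect (l :: ls)
        rw [pvCollect, if_neg (show ¬ pvIsStrbA l = true from h)]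
        have ihs : ls.take (j + 1) = pvCollect ls := by rw [hf] at ih; exact ih
        rw [List.take_succ_cons, ihs]

-- A's whole loop = first-marker index + collect from there
theorem pvMain (ls : List String) :
    pvLoopA ls false [] =
      (match pvFindStart ls 0 with
       | none => []
       | some i => pvCollect (ls.drop i)) := by
  induction ls with
  | nil => rfl
  | cons l ls ih =>
    by_cases h : pvIsStartA l = true
    · rw [show pvFindStart (l :: ls) 0 = some 0 by
        rw [pvFindStart, if_pos (show pvIsStartB l = true from h)]]
      show pvLoopA (l :: ls) false [] = pvCollect ((l :: ls).drop 0)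
      rw [List.drop_zero,
        show pvLoopA (l :: ls) false [] =
            (if pvIsStrbA l = true then [l] else pvLoopA ls true [l]) by
          rw [pvLoopA, if_pos h, if_pos rfl]; rfl,
        pvCollect]
      by_cases hs : pvIsStrbA l = true
      · rw [if_pos hs, if_pos hs]
      · rw [if_neg hs, if_neg hs, pvLoopA_true]; rfl
    · have hB : ¬ pvIsStartB l = true := h
      rw [show pvLoopA (l :: ls) false [] = pvLoopA ls false [] by
        rw [pvLoopA, if_neg h, if_neg (by simp)]]
      rw [ih]
      rcases hf : pvFindStart ls 0 with _ | i
      · rw [show pvFindStart (l :: ls) 0 = none by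
          rw [pvFindStart, if_neg hB, pvFindStart_shift ls 1, hf]; rfl]
      · rw [show pvFindStart (l :: ls) 0 = some (i + 1) by
          rw [pvFindStart, if_neg hB, pvFindStart_shift ls 1, hf]; rfl]
        rfl

-- ===== VERDICT (by name: the statement is the Claim_ definition above) =====
theorem extract_literal_pattern_spec : Claim_equal_extract_literal_pattern := by
  intro asm _
  unfold Spec_extract_literal_pattern extract_literal_pattern extract_literal_pattern_alt
  rw [pvMain]
  rcases h : pvFindStart asm 0 with _ | i
  · rfl
  · exact (pvTail_eq_collect (asm.drop i)).symm
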